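-- pv_equiv track=rewrite | github.com/ospTEAM4/OSP_TERM | 1.py | clean_wordlist
-- ===== SOURCE A (Python) =====
-- def clean_wordlist(input_list):
--     output_list = []
--     for word in input_list:
--         symbols = """!@#$%^&*()_-+={[}]|\;:"‘'·<>?/., """
--         for i in range(len((symbols))):
--             word = word.replace(symbols[i], '')
--         if len(word) > 0:
--             output_list.append(word)
--     return output_list
-- ===== SOURCE B (Python) =====
-- def clean_wordlist(input_list):
--     symbols = set("""!@#$%^&*()_-+={[}]|\;:"‘'·<>?/., """)
--     output_list = []
--     for word in input_list:
--         cleaned = ''.join(c for c in word if c not in symbols)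
--         if cleaned:
--             output_list.append(cleaned)
--     return output_list
-- ===== Notes on version B (the rewrite author's own statement) =====
-- stated objective: idiomatic
-- what changed: Replaces the per-word loop of k full-string replace passes (one per symbol) with a single left-to-right membership filter against a symbol set built once.
import Mathlib
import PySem

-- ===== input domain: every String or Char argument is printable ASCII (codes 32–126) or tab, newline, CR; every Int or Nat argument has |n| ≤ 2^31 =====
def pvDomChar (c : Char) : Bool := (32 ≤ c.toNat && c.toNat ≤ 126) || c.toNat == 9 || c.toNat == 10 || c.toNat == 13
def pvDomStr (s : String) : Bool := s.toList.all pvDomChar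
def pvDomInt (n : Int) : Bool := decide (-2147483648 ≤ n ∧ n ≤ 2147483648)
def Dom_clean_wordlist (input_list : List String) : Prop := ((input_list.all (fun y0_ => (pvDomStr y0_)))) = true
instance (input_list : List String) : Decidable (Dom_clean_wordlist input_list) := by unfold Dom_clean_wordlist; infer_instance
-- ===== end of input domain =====

-- B replaces A's 33 full-string replace passes per word with one membership-filter pass
-- against a symbol set built once (idiomatic rewrite; return value only, no mutation).

-- the exact symbol literal of the Python source (33 chars, incl. '‘', '·' and a trailing space)
def pvSymbols : String := "!@#$%^&*()_-+={[}]|\\;:\"‘'·<>?/., "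

-- ===== PORT A =====
def clean_wordlist (input_list : List String) : List String :=
  input_list.foldl
    (fun output_list word =>
      -- for i in range(len(symbols)): word = word.replace(symbols[i], '')
      let word := pvSymbols.toList.foldl
        (fun w c => PySem.Str.replace w (String.ofList [c]) "") word
      if PySem.Str.len word > 0 then output_list ++ [word] else output_list)
    []

-- ===== PORT B =====
-- symbols = set(literal), built once
def pvSymSet : PySem.Set Char := PySem.Set.ofList pvSymbols.toList

def clean_wordlist_alt (input_list : List String) : List String :=
  input_list.foldl
    (fun acc word =>
      -- cleaned = ''.join(c for c in word if c not in symbols)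
      let cleaned := String.ofList (word.toList.filter (fun c => !pvSymSet.contains c))
      if cleaned.toList ≠ [] then acc ++ [cleaned] else acc)
    []

-- ===== PRECONDITION & SPEC =====
def Spec_clean_wordlist (input_list : List String) (out : List String) : Prop := out = clean_wordlist_alt input_list
instance (input_list : List String) (out : List String) : Decidable (Spec_clean_wordlist input_list out) := by unfold Spec_clean_wordlist; infer_instance

-- ===== CLAIM (what is proved, stated in full; the proofs are below) =====
def Claim_equal_clean_wordlist : Prop := ∀ (input_list : List String), Dom_clean_wordlist input_list → Spec_clean_wordlist input_list (clean_wordlist input_list)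

-- ===== LEMMAS AND PROOFS =====

-- replace.go with a single-char pattern and empty replacement is a filter
theorem pv_go_single (c : Char) : ∀ (fuel : Nat) (l acc : List Char), l.length ≤ fuel →
    PySem.Chars.replace.go [c] [] fuel l acc = acc.reverse ++ l.filter (· ≠ c) := by
  intro fuel
  induction fuel with
  | zero =>
    intro l acc h
    have : l = [] := List.eq_nil_of_length_eq_zero (Nat.le_zero.mp h)
    subst this; simp [PySem.Chars.replace.go]
  | succ n ih =>
    intro l acc h
    cases l with
    | nil => simp [PySem.Chars.replace.go]
    | cons x t =>
      simp only [PySem.Chars.replace.go]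
      by_cases hx : x = c
      · subst hx
        have hp : List.isPrefixOf [x] (x :: t) = true := by simp [List.isPrefixOf]
        rw [if_pos hp]
        simp only [List.length_singleton, List.drop_one, List.tail_cons,
          List.reverse_nil, List.nil_append]
        rw [ih t acc (by simpa using Nat.le_of_succ_le_succ h)]
        simp
      · have hp : List.isPrefixOf [c] (x :: t) = false := by
          simp [List.isPrefixOf]; exact fun hcx => (hx hcx.symm).elim
        rw [if_neg (by simp [hp])]
        rw [ih t (x :: acc) (by simpa using Nat.le_of_succ_le_succ h)]
        simp [hx]

theorem pv_replace_single (c : Char) (l : List Char) :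
    PySem.Chars.replace l [c] [] = l.filter (· ≠ c) := by
  have h := pv_go_single c l.length l [] le_rfl
  simpa [PySem.Chars.replace] using h

-- folding single-char replaces over a list of symbols is one membership filter
theorem pv_fold_replace (syms : List Char) : ∀ (w : String),
    (syms.foldl (fun w c => PySem.Str.replace w (String.ofList [c]) "") w).toList
      = w.toList.filter (fun c => !syms.contains c) := by
  induction syms with
  | nil => intro w; simp
  | cons c t ih =>
    intro w
    simp only [List.foldl]
    rw [ih]
    have hrep : (PySem.Str.replace w (String.ofList [c]) "").toList
        = w.toList.filter (· ≠ c) := by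
      simp [PySem.Str.replace, pv_replace_single]
    rw [hrep, List.filter_filter]
    apply List.filter_congr
    intro a _
    by_cases hac : a = c <;> simp [hac]

-- the symbol set of B contains exactly the symbol characters
theorem pv_symset_contains (a : Char) : pvSymSet.contains a = pvSymbols.toList.contains a := by
  have h : a ∈ pvSymSet ↔ a ∈ pvSymbols.toList :=
    PySem.Set.mem_ofList pvSymbols.toList a
  by_cases hm : a ∈ pvSymbols.toList
  · simp [hm, h.mpr hm]
  · have h2 : a ∉ pvSymSet := fun hc => hm (h.mp hc)
    simp [List.contains_eq_mem, hm, h2]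

-- the per-word steps of the two ports agree
theorem pv_step_eq :
    (fun (output_list : List String) (word : String) =>
      let word := pvSymbols.toList.foldl
        (fun w c => PySem.Str.replace w (String.ofList [c]) "") word
      if PySem.Str.len word > 0 then output_list ++ [word] else output_list)
    = (fun (acc : List String) (word : String) =>
      let cleaned := String.ofList (word.toList.filter (fun c => !pvSymSet.contains c))
      if cleaned.toList ≠ [] then acc ++ [cleaned] else acc) := by
  funext acc word
  simp only []
  have hflt : word.toList.filter (fun c => !pvSymbols.toList.contains c)
      = word.toList.filter (fun c => !pvSymSet.contains c) := by
    apply List.filter_congr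
    intro a _
    rw [pv_symset_contains]
  have hstr : pvSymbols.toList.foldl
      (fun w c => PySem.Str.replace w (String.ofList [c]) "") word
      = String.ofList (word.toList.filter (fun c => !pvSymSet.contains c)) := by
    apply String.toList_inj.mp
    rw [pv_fold_replace, hflt]
    simp
  rw [hstr]
  have hlen : (PySem.Str.len (String.ofList (word.toList.filter (fun c => !pvSymSet.contains c))) > 0)
      ↔ ((String.ofList (word.toList.filter (fun c => !pvSymSet.contains c))).toList ≠ []) := by
    simp [PySem.Str.len]
  by_cases hc : (String.ofList (word.toList.filter (fun c => !pvSymSet.contains c))).toList ≠ []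
  · rw [if_pos (hlen.mpr hc), if_pos hc]
  · rw [if_neg (fun h => hc (hlen.mp h)), if_neg hc]

-- ===== VERDICT (by name: the statement is the Claim_ definition above) =====
theorem clean_wordlist_spec : Claim_equal_clean_wordlist := by
  intro input_list _
  unfold Spec_clean_wordlist clean_wordlist clean_wordlist_alt
  rw [pv_step_eq]
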